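-- pv_equiv track=rewrite | github.com/mateo19182/vexor-project-barcelona | backend/app/pipeline/modules/image_search.py | _platform_for
-- ===== SOURCE A (Python) =====
-- PLATFORM_BY_DOMAIN: dict[str, str] = {
--     "linkedin.com": "LinkedIn",
--     "twitter.com": "Twitter",
--     "x.com": "Twitter",
--     "facebook.com": "Facebook",
--     "fb.com": "Facebook",
--     "instagram.com": "Instagram",
--     "threads.net": "Threads",
--     "tiktok.com": "TikTok",
--     "github.com": "GitHub",
--     "youtube.com": "YouTube",
--     "reddit.com": "Reddit",
--     "pinterest.com": "Pinterest",
--     "medium.com": "Medium",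
--     "substack.com": "Substack",
--     "about.me": "About.me",
--     "behance.net": "Behance",
--     "dribbble.com": "Dribbble",
--     "stackoverflow.com": "Stack Overflow",
--     "quora.com": "Quora",
-- }
--
-- def _platform_for(domain: str) -> str | None:
--     if not domain:
--         return None
--     domain = domain.lower().lstrip(".")
--     for suffix in sorted(PLATFORM_BY_DOMAIN, key=len, reverse=True):
--         if domain == suffix or domain.endswith(f".{suffix}"):
--             return PLATFORM_BY_DOMAIN[suffix]
--     return None
-- ===== SOURCE B (Python) =====
-- PLATFORM_BY_DOMAIN: dict[str, str] = {
--     "linkedin.com": "LinkedIn",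
--     "twitter.com": "Twitter",
--     "x.com": "Twitter",
--     "facebook.com": "Facebook",
--     "fb.com": "Facebook",
--     "instagram.com": "Instagram",
--     "threads.net": "Threads",
--     "tiktok.com": "TikTok",
--     "github.com": "GitHub",
--     "youtube.com": "YouTube",
--     "reddit.com": "Reddit",
--     "pinterest.com": "Pinterest",
--     "medium.com": "Medium",
--     "substack.com": "Substack",
--     "about.me": "About.me",
--     "behance.net": "Behance",
--     "dribbble.com": "Dribbble",
--     "stackoverflow.com": "Stack Overflow",
--     "quora.com": "Quora",
-- }
--
-- def _platform_for(domain: str) -> str | None: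
--     # Walk the domain itself, longest dot-suffix first: look the current tail up
--     # in the dict, else strip the leading label and retry.  No sort, no scan of
--     # the key list; correct because no table key is a dot-suffix of another.
--     if not domain:
--         return None
--     d = domain.lower().lstrip(".")
--     while True:
--         if d in PLATFORM_BY_DOMAIN:
--             return PLATFORM_BY_DOMAIN[d]
--         i = d.find(".")
--         if i < 0:
--             return None
--         d = d[i + 1:]
-- ===== Notes on version B (the rewrite author's own statement) =====
-- stated objective: alternative
-- what changed: Instead of sorting the table keys by length and scanning them with endswith, B walks the domain itself: it looks the current tail up in the dict and strips the leading label until a key is hit, so the per-call sort and the scan over all keys disappear.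
import Mathlib
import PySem

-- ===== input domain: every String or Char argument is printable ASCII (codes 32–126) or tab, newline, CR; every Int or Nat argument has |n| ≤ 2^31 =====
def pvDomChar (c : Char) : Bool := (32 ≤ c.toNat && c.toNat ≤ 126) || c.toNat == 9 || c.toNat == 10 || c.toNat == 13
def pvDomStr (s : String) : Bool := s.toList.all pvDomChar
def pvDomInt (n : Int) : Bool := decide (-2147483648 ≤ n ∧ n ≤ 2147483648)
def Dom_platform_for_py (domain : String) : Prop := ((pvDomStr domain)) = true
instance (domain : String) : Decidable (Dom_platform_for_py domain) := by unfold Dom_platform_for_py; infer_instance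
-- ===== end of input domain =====

-- B walks the domain itself (strip leading label until the tail is a dict key) instead of A's sort-keys-by-length-then-endswith scan; alternative structure, same results.

-- ===== PORT A =====
-- the module-level dict (shared constant of both versions)
def PLATFORM_BY_DOMAIN : PySem.Dict String String := PySem.Dict.ofList [
  ("linkedin.com", "LinkedIn"), ("twitter.com", "Twitter"), ("x.com", "Twitter"),
  ("facebook.com", "Facebook"), ("fb.com", "Facebook"), ("instagram.com", "Instagram"),
  ("threads.net", "Threads"), ("tiktok.com", "TikTok"), ("github.com", "GitHub"),
  ("youtube.com", "YouTube"), ("reddit.com", "Reddit"), ("pinterest.com", "Pinterest"),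
  ("medium.com", "Medium"), ("substack.com", "Substack"), ("about.me", "About.me"),
  ("behance.net", "Behance"), ("dribbble.com", "Dribbble"),
  ("stackoverflow.com", "Stack Overflow"), ("quora.com", "Quora")]

-- `domain == suffix or domain.endswith(f".{suffix}")` (A's per-key test)
def pvMatch (d s : String) : Bool := (d == s) || PySem.Str.endswith d ("." ++ s)

-- `domain.lower().lstrip(".")`; lstrip(".") ported by hand as dropWhile (== '.'), exact for a one-char strip set
def pvNorm (domain : String) : String :=
  String.ofList ((PySem.Str.lower domain).toList.dropWhile (fun c => c == '.'))

-- A's for-loop: first suffix (in length-descending sorted order) that matches returns dict[suffix]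
def platA_loop (d : String) : List String → Option String
  | [] => none
  | s :: rest =>
    if pvMatch d s then PySem.Dict.get? PLATFORM_BY_DOMAIN s else platA_loop d rest

def platform_for_py (domain : String) : Option String :=
  if domain = "" then none
  else
    platA_loop (pvNorm domain)
      (PySem.List.sorted (PySem.Dict.keys PLATFORM_BY_DOMAIN) (fun s => s.length) true)

-- ===== PORT B =====
-- B's while-loop: if the current tail `d` is a dict key return its value,
-- else drop everything up to and including the first '.' and retry; None when no '.' is left.
def platB_loop (d : List Char) : Option String :=
  if PySem.Dict.contains PLATFORM_BY_DOMAIN (String.ofList d) then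
    PySem.Dict.get? PLATFORM_BY_DOMAIN (String.ofList d)
  else
    let i := PySem.Chars.find d ['.']
    if i < 0 then none
    else platB_loop (d.drop (i.toNat + 1))
termination_by d.length
decreasing_by
  rename_i hneg
  have h0 : 0 ≤ PySem.Chars.find d ['.'] := by omega
  have hinf : ['.'] <:+: d := (PySem.Chars.find_nonneg_iff d ['.']).1 h0
  have hlen : (1 : Nat) ≤ d.length := by
    simpa using hinf.length_le
  simp [List.length_drop]
  omega

def platform_for_py_alt (domain : String) : Option String :=
  if domain = "" then none
  else platB_loop (pvNorm domain).toList

-- ===== PRECONDITION & SPEC =====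
def Spec_platform_for_py (domain : String) (out : Option String) : Prop := out = platform_for_py_alt domain
instance (domain : String) (out : Option String) : Decidable (Spec_platform_for_py domain out) := by unfold Spec_platform_for_py; infer_instance

-- ===== CLAIM (what is proved, stated in full; the proofs are below) =====
def Claim_equal_platform_for_py : Prop := ∀ (domain : String), Dom_platform_for_py domain → Spec_platform_for_py domain (platform_for_py domain)

-- ===== LEMMAS AND PROOFS =====

-- "c is a dot-suffix of d": c is d itself, or d = p ++ '.' :: c
def DS (c d : List Char) : Prop := c = d ∨ ∃ p, d = p ++ '.' :: c

lemma DS_refl (c : List Char) : DS c c := Or.inl rfl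

lemma DS_trans {x c d : List Char} (h₁ : DS x c) (h₂ : DS c d) : DS x d := by
  rcases h₁ with rfl | ⟨q, rfl⟩
  · exact h₂
  · rcases h₂ with rfl | ⟨p, rfl⟩
    · exact Or.inr ⟨q, rfl⟩
    · exact Or.inr ⟨p ++ '.' :: q, by simp⟩

-- `d.endswith("." + s)` read as a list-suffix statement
lemma endswith_dot_suffix (d s : String) :
    PySem.Str.endswith d ("." ++ s) = true ↔ ('.' :: s.toList) <:+ d.toList := by
  rw [PySem.Str.endswith_eq, PySem.Chars.endswith_iff, String.toList_append]
  have h : (".").toList = ['.'] := rfl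
  rw [h, List.singleton_append]

-- A's per-key test IS the dot-suffix relation
lemma pvMatch_iff_DS (d s : String) : pvMatch d s = true ↔ DS s.toList d.toList := by
  unfold pvMatch DS
  rw [Bool.or_eq_true, beq_iff_eq, endswith_dot_suffix]
  constructor
  · rintro (rfl | ⟨p, hp⟩)
    · exact Or.inl rfl
    · exact Or.inr ⟨p, hp.symm⟩
  · rintro (h | ⟨p, hp⟩)
    · exact Or.inl (String.toList_inj.1 h.symm)
    · exact Or.inr ⟨p, hp.symm⟩

-- no key of the table dot-ends with another key
lemma keys_no_dot_suffix :
    (PLATFORM_BY_DOMAIN.items.map Prod.fst).all (fun a =>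
      (PLATFORM_BY_DOMAIN.items.map Prod.fst).all (fun b =>
        !(PySem.Str.endswith a ("." ++ b)))) = true := by decide

-- at most one table key matches any given (normalized) domain
lemma match_unique (d s₁ s₂ : String)
    (h₁ : s₁ ∈ PLATFORM_BY_DOMAIN.items.map Prod.fst)
    (h₂ : s₂ ∈ PLATFORM_BY_DOMAIN.items.map Prod.fst)
    (m₁ : pvMatch d s₁ = true) (m₂ : pvMatch d s₂ = true) : s₁ = s₂ := by
  have noPair : ∀ a ∈ PLATFORM_BY_DOMAIN.items.map Prod.fst,
      ∀ b ∈ PLATFORM_BY_DOMAIN.items.map Prod.fst,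
      PySem.Str.endswith a ("." ++ b) = false := by
    intro a ha b hb
    have h := keys_no_dot_suffix
    simp only [List.all_eq_true] at h
    simpa using h a ha b hb
  simp only [pvMatch, Bool.or_eq_true, beq_iff_eq] at m₁ m₂
  rcases m₁ with e₁ | e₁ <;> rcases m₂ with e₂ | e₂
  · rw [← e₁, ← e₂]
  · rw [e₁] at e₂
    exact Bool.noConfusion (e₂.symm.trans (noPair s₁ h₁ s₂ h₂))
  · rw [e₂] at e₁
    exact Bool.noConfusion (e₁.symm.trans (noPair s₂ h₂ s₁ h₁))
  · have hs₁ := (endswith_dot_suffix d s₁).1 e₁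
    have hs₂ := (endswith_dot_suffix d s₂).1 e₂
    rcases List.suffix_or_suffix_of_suffix hs₁ hs₂ with hss | hss
    · rcases List.suffix_cons_iff.1 hss with heq | hsuf
      · have : s₁.toList = s₂.toList := by injection heq
        exact String.toList_inj.1 this
      · have h' : PySem.Str.endswith s₂ ("." ++ s₁) = true := (endswith_dot_suffix s₂ s₁).2 hsuf
        exact Bool.noConfusion (h'.symm.trans (noPair s₂ h₂ s₁ h₁))
    · rcases List.suffix_cons_iff.1 hss with heq | hsuf
      · have : s₂.toList = s₁.toList := by injection heq
        exact (String.toList_inj.1 this).symm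
      · have h' : PySem.Str.endswith s₁ ("." ++ s₂) = true := (endswith_dot_suffix s₁ s₂).2 hsuf
        exact Bool.noConfusion (h'.symm.trans (noPair s₁ h₁ s₂ h₂))

lemma A_loop_none (d : String) (L : List String)
    (h : ∀ s ∈ L, pvMatch d s = false) : platA_loop d L = none := by
  induction L with
  | nil => rfl
  | cons a t ih =>
    simp only [platA_loop, h a (by simp)]
    exact ih (fun s hs => h s (by simp [hs]))

lemma A_loop_found (d s : String) (L : List String)
    (hs : s ∈ L) (hm : pvMatch d s = true)
    (hu : ∀ t ∈ L, pvMatch d t = true → t = s) :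
    platA_loop d L = PySem.Dict.get? PLATFORM_BY_DOMAIN s := by
  induction L with
  | nil => simp at hs
  | cons a t ih =>
    by_cases ha : pvMatch d a = true
    · have has : a = s := hu a (by simp) ha
      subst has
      simp [platA_loop, ha]
    · have hst : s ∈ t := by
        rcases List.mem_cons.1 hs with rfl | h
        · exact absurd hm ha
        · exact h
      simp only [platA_loop]
      rw [if_neg ha]
      exact ih hst (fun u hu' hm' => hu u (by simp [hu']) hm')

-- membership of `String.ofList c` in the dict keys, as a DS fact, given `c` not a raising key context
lemma contains_iff_key (c : List Char) :
    PySem.Dict.contains PLATFORM_BY_DOMAIN (String.ofList c) = true ↔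
      ∃ s ∈ PLATFORM_BY_DOMAIN.items.map Prod.fst, s.toList = c := by
  rw [PySem.Dict.contains_iff_mem_keys]
  have hkeys : PySem.Dict.keys PLATFORM_BY_DOMAIN = PLATFORM_BY_DOMAIN.items.map Prod.fst := rfl
  rw [hkeys]
  constructor
  · intro h
    exact ⟨String.ofList c, h, by simp⟩
  · rintro ⟨s, hs, rfl⟩
    simpa using hs

-- a step of B's loop: if the first '.' of c is at index j, then c decomposes there
lemma find_dot_decomp (c : List Char) (h : 0 ≤ PySem.Chars.find c ['.']) :
    c = c.take (PySem.Chars.find c ['.']).toNat ++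
        '.' :: c.drop ((PySem.Chars.find c ['.']).toNat + 1) := by
  set j : Nat := (PySem.Chars.find c ['.']).toNat with hj
  have hne : PySem.Chars.find c ['.'] ≠ -1 := by omega
  have hspec := PySem.Chars.findFrom_natCast_spec c ['.'] 0 (by simp)
      (by simpa only [Nat.cast_zero, PySem.Chars.findFrom_zero] using hne)
  simp only [Nat.cast_zero, PySem.Chars.findFrom_zero] at hspec
  obtain ⟨-, hpre, -⟩ := hspec
  obtain ⟨t, ht⟩ := hpre
  have hdrop : c.drop j = '.' :: t := by simpa using ht.symm
  have hdt : t = c.drop (j + 1) := by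
    have := congrArg (List.drop 1) hdrop
    simpa [List.drop_drop, Nat.add_comm] using this.symm
  calc c = c.take j ++ c.drop j := (List.take_append_drop j c).symm
    _ = c.take j ++ '.' :: c.drop (j + 1) := by rw [hdrop, hdt]

-- B's loop returns none when no table key is a dot-suffix of the current tail
lemma B_none : ∀ n (c : List Char), c.length ≤ n →
    (∀ s ∈ PLATFORM_BY_DOMAIN.items.map Prod.fst, ¬ DS s.toList c) →
    platB_loop c = none := by
  intro n
  induction n with
  | zero =>
    intro c hc h
    have hnil : c = [] := List.eq_nil_of_length_eq_zero (by omega)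
    subst hnil
    rw [platB_loop]
    rw [if_neg (by
      intro hcon
      obtain ⟨s, hs, hsl⟩ := (contains_iff_key []).1 hcon
      exact h s hs (hsl ▸ DS_refl []))]
    rw [if_pos (by decide)]
  | succ n ih =>
    intro c hc h
    rw [platB_loop]
    rw [if_neg (by
      intro hcon
      obtain ⟨s, hs, hsl⟩ := (contains_iff_key c).1 hcon
      exact h s hs (hsl ▸ DS_refl c))]
    by_cases hlt : PySem.Chars.find c ['.'] < 0
    · rw [if_pos hlt]
    · rw [if_neg hlt]
      have h0 : 0 ≤ PySem.Chars.find c ['.'] := by omega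
      have hdec := find_dot_decomp c h0
      set j : Nat := (PySem.Chars.find c ['.']).toNat
      have hinf : ['.'] <:+: c := (PySem.Chars.find_nonneg_iff c ['.']).1 h0
      have hone : (1 : Nat) ≤ c.length := by simpa using hinf.length_le
      have hlen : (c.drop (j + 1)).length ≤ n := by
        have := List.length_drop (l := c) (i := j + 1)
        omega
      apply ih _ hlen
      intro s hs hDS
      exact h s hs (DS_trans hDS (Or.inr ⟨c.take j, hdec⟩))

-- B's loop finds the (unique) table key that is a dot-suffix of the tail
lemma B_found (d0 : List Char) (s : String)
    (hs : s ∈ PLATFORM_BY_DOMAIN.items.map Prod.fst)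
    (huniq : ∀ t ∈ PLATFORM_BY_DOMAIN.items.map Prod.fst, DS t.toList d0 → t = s) :
    ∀ n (c : List Char), c.length ≤ n → DS c d0 → DS s.toList c →
    platB_loop c = PySem.Dict.get? PLATFORM_BY_DOMAIN s := by
  intro n
  induction n with
  | zero =>
    intro c hc hcd hsc
    -- c.length = 0; then DS s.toList c forces s.toList = c = []
    rcases hsc with hsl | ⟨p, hp⟩
    · rw [platB_loop]
      rw [if_pos ((contains_iff_key c).2 ⟨s, hs, hsl⟩)]
      rw [← hsl]
      simp
    · exfalso
      have : c.length = 0 := by omega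
      rw [hp] at this
      simp at this
  | succ n ih =>
    intro c hc hcd hsc
    by_cases hcon : PySem.Dict.contains PLATFORM_BY_DOMAIN (String.ofList c) = true
    · obtain ⟨k, hk, hkl⟩ := (contains_iff_key c).1 hcon
      have hks : k = s := huniq k hk (DS_trans (hkl ▸ DS_refl c) hcd)
      rw [platB_loop, if_pos hcon, ← hkl, hks]
      simp
    · rcases hsc with hsl | ⟨p, hp⟩
      · exact absurd ((contains_iff_key c).2 ⟨s, hs, hsl⟩) hcon
      rw [platB_loop]
      rw [if_neg (by simpa using hcon)]
      have hdot : ['.'] <:+: c := ⟨p, s.toList, by simpa using hp.symm⟩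
      have h0 : 0 ≤ PySem.Chars.find c ['.'] := (PySem.Chars.find_nonneg_iff c ['.']).2 hdot
      rw [if_neg (by omega)]
      set j : Nat := (PySem.Chars.find c ['.']).toNat with hj
      have hdec := find_dot_decomp c h0
      -- minimality: j ≤ p.length, since c has a dot at index p.length
      have hspec := PySem.Chars.findFrom_natCast_spec c ['.'] 0 (by simp)
          (by simp only [Nat.cast_zero, PySem.Chars.findFrom_zero]; omega)
      simp only [Nat.cast_zero, PySem.Chars.findFrom_zero] at hspec
      obtain ⟨-, -, hmin⟩ := hspec
      have hjp : j ≤ p.length := by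
        by_contra hgt
        have hple : ['.'] <+: c.drop p.length := by
          rw [hp, List.drop_left]
          exact ⟨s.toList, rfl⟩
        exact hmin p.length (by omega) (by omega) hple
      have hone : (1 : Nat) ≤ c.length := by simpa using hdot.length_le
      have hlen : (c.drop (j + 1)).length ≤ n := by
        have := List.length_drop (l := c) (i := j + 1)
        omega
      have hnext : DS s.toList (c.drop (j + 1)) := by
        rcases Nat.lt_or_ge j p.length with hlt | hge
        · right
          refine ⟨p.drop (j + 1), ?_⟩
          rw [hp, List.drop_append_of_le_length (by omega)]
        · have hjep : j = p.length := by omega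
          left
          have h2 : c = (p ++ ['.']) ++ s.toList := by rw [hp]; simp
          have h3 : j + 1 = (p ++ ['.']).length := by simp [hjep]
          rw [h2, h3, List.drop_left]
      have hnextd : DS (c.drop (j + 1)) d0 :=
        DS_trans (Or.inr ⟨c.take j, hdec⟩) hcd
      exact ih _ hlen hnextd hnext

-- ===== VERDICT (by name: the statement is the Claim_ definition above) =====
theorem platform_for_py_spec : Claim_equal_platform_for_py := by
  intro domain _
  unfold Spec_platform_for_py platform_for_py platform_for_py_alt
  by_cases h0 : domain = ""
  · rw [if_pos h0, if_pos h0]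
  · rw [if_neg h0, if_neg h0]
    generalize pvNorm domain = d
    have hkeys : PySem.Dict.keys PLATFORM_BY_DOMAIN = PLATFORM_BY_DOMAIN.items.map Prod.fst := rfl
    have hSKmem : ∀ s : String,
        s ∈ PySem.List.sorted (PySem.Dict.keys PLATFORM_BY_DOMAIN) (fun s => s.length) true ↔
        s ∈ PLATFORM_BY_DOMAIN.items.map Prod.fst := by
      intro s
      rw [hkeys]
      exact PySem.List.mem_sorted _ (fun s : String => s.length) true s
    by_cases hex : ∃ s ∈ PLATFORM_BY_DOMAIN.items.map Prod.fst, pvMatch d s = true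
    · obtain ⟨s, hsK, hsm⟩ := hex
      have hA : platA_loop d
          (PySem.List.sorted (PySem.Dict.keys PLATFORM_BY_DOMAIN) (fun s => s.length) true) =
          PySem.Dict.get? PLATFORM_BY_DOMAIN s := by
        apply A_loop_found d s _ ((hSKmem s).2 hsK) hsm
        intro t ht hmt
        exact match_unique d t s ((hSKmem t).1 ht) hsK hmt hsm
      have hB : platB_loop d.toList = PySem.Dict.get? PLATFORM_BY_DOMAIN s := by
        apply B_found d.toList s hsK
          (fun t ht hDS => match_unique d t s ht hsK ((pvMatch_iff_DS d t).2 hDS) hsm)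
          d.toList.length d.toList le_rfl (DS_refl _)
          ((pvMatch_iff_DS d s).1 hsm)
      rw [hA, hB]
    · push Not at hex
      have hA : platA_loop d
          (PySem.List.sorted (PySem.Dict.keys PLATFORM_BY_DOMAIN) (fun s => s.length) true) = none := by
        apply A_loop_none
        intro s hs
        simpa using hex s ((hSKmem s).1 hs)
      have hB : platB_loop d.toList = none := by
        apply B_none d.toList.length d.toList le_rfl
        intro s hs hDS
        exact absurd ((pvMatch_iff_DS d s).2 hDS) (by simpa using hex s hs)
      rw [hA, hB]
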